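-- pv_equiv track=rewrite | github.com/delyan-kirov/Geometric-Lattice | SGS/add_sym_constraints.py | bijection
-- ===== SOURCE A (Python) =====
-- def bijection(data, n):
--     identity = list(range(0,n))
--     for i in range(0,len(data)-1):
--         if data[i] == '(':
--             keep = data[i+1]
--         if data[i] == ')':
--             continue
--         if data[i+1] == ')':
--             identity[int(data[i])] = int(keep)
--         if data[i+1] != ')' and (data[i] != "("):
--             identity[int(data[i])] = int(data[i+1])
--     return identity
-- ===== SOURCE B (Python) =====
-- def bijection(data, n):
--     # Two-phase: first scan data once into a list of cycles (the tokens found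
--     # between a '(' and the next ')'; characters outside any group and empty
--     # groups are ignored), then apply each cycle by mapping every token to its
--     # successor, the last back to the first.
--     identity = list(range(0, n))
--     cycles, cur = [], None
--     for ch in data:
--         if ch == '(':
--             cur = []
--         elif ch == ')':
--             if cur:
--                 cycles.append(cur)
--             cur = None
--         elif cur is not None:
--             cur.append(ch)
--     for c in cycles:
--         for x, y in zip(c, c[1:]):
--             identity[int(x)] = int(y)
--         identity[int(c[-1])] = int(c[0])
--     return identity
-- ===== Notes on version B (the rewrite author's own statement) =====
-- stated objective: simpler
-- what changed: B replaces A's flat single pass with its 'keep' sentinel and four interacting branch tests by a two-phase decomposition: one scan groups the characters into cycles, then each cycle is applied by mapping every token to its successor (last back to first).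
-- outside the precondition, e.g. on bijection('12', 3): A returns [0, 2, 2], B returns [0, 1, 2]; on bijection('(12', 3): A returns [0, 2, 2], B returns [0, 1, 2]
import Mathlib
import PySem

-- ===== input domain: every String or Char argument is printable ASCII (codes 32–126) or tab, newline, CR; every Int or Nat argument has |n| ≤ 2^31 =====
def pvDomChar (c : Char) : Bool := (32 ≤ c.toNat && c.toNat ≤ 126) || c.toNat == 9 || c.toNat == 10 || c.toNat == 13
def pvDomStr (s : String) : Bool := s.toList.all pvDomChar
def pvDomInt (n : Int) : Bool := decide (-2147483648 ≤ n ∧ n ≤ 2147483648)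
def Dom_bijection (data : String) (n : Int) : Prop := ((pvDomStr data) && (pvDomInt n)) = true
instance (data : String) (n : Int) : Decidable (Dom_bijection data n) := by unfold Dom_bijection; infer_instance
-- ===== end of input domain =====

-- B replaces A's flat sentinel-carrying pass by a two-phase structure (group the
-- characters into cycles, then apply each cycle); same O(len(data)) cost, simpler.

-- int(c) for a single digit character; exact because Pre_ admits only digit tokens.
def pyDigit (c : Char) : Int := (c.toNat : Int) - 48

-- ===== PORT A =====
-- One step of A's loop body for i, on the pair (data[i], data[i+1]); the state is
-- (identity, keep).  'for i in range(0, len(data)-1)' reading data[i] and data[i+1]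
-- is transliterated as a fold over cs.zip cs.tail (exactly the len-1 adjacent pairs).
-- Python's keep starts undefined (NameError if read first) — Pre_ guarantees a '('
-- sets it before any read, so the dummy initial ' ' is never read on admitted inputs.
-- identity[j] = v is List.set (Pre_ guarantees 0 ≤ j < n, where Python would raise).
def bijAStep (st : List Int × Char) (p : Char × Char) : List Int × Char :=
  let identity := st.1
  let keep := if p.1 = '(' then p.2 else st.2
  if p.1 = ')' then (identity, keep)
  else
    let identity := if p.2 = ')' then identity.set (pyDigit p.1).toNat (pyDigit keep) else identity
    let identity := if p.2 ≠ ')' ∧ p.1 ≠ '(' then identity.set (pyDigit p.1).toNat (pyDigit p.2) else identity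
    (identity, keep)

def bijection (data : String) (n : Int) : List Int :=
  let cs := data.toList
  (List.foldl bijAStep (PySem.List.pyRange 0 n 1, ' ') (cs.zip cs.tail)).1

-- ===== PORT B =====
-- Phase 1 of Source B: the body of 'for ch in data' building (cycles, cur).
-- cur = None is Option.none; Python's truthiness 'if cur:' is the cur ≠ [] test.
def parseStep (st : List (List Char) × Option (List Char)) (ch : Char) :
    List (List Char) × Option (List Char) :=
  if ch = '(' then (st.1, some [])
  else if ch = ')' then
    match st.2 with
    | some cur => if cur ≠ [] then (st.1 ++ [cur], none) else (st.1, none)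
    | none => (st.1, none)
  else
    match st.2 with
    | some cur => (st.1, some (cur ++ [ch]))
    | none => st

-- Phase 2 of Source B, per cycle c: pairs via zip(c, c[1:]), then identity[int(c[-1])] = int(c[0]).
-- (Collected cycles are never empty, so the IndexError fallback branch is unreachable.)
def bijCycleApply (identity : List Int) (c : List Char) : List Int :=
  let identity := (c.zip c.tail).foldl
    (fun id p => id.set (pyDigit p.1).toNat (pyDigit p.2)) identity
  match PySem.List.pyGet? c (-1), PySem.List.pyGet? c 0 with
  | some lastC, some firstC => identity.set (pyDigit lastC).toNat (pyDigit firstC)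
  | _, _ => identity

def bijection_alt (data : String) (n : Int) : List Int :=
  let identity := PySem.List.pyRange 0 n 1
  let cycles := (data.toList.foldl parseStep ([], none)).1
  cycles.foldl bijCycleApply identity

-- ===== PRECONDITION & SPEC =====
-- A valid token: a decimal digit whose value is an in-range index of identity.
def okTok (n : Int) (c : Char) : Bool := c.isDigit && decide (pyDigit c < n)

-- Recognizer for inputs on which A returns normally AND its value is the cycle
-- semantics: groups '(t…t)' of digit tokens with value < n, stray ')' and '('
-- runs between groups, a dangling group with at most one token, a single stray
-- trailing character.  State 0: outside a group; 1: after '(' before any token;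
-- 2: after exactly one token; 3: after two or more tokens.
def wfAux (n : Int) : Nat → List Char → Bool
  | 0, [] => true
  | 0, c :: r => if c = '(' then wfAux n 1 r else if c = ')' then wfAux n 0 r else r.isEmpty
  | 1, [] => true
  | 1, c :: r => if c = '(' then wfAux n 1 r else if c = ')' then false
                 else if okTok n c then wfAux n 2 r else r.isEmpty
  | 2, [] => true
  | 2, c :: r => if c = ')' then wfAux n 0 r else okTok n c && wfAux n 3 r
  | 3, [] => false
  | 3, c :: r => if c = ')' then wfAux n 0 r else okTok n c && wfAux n 3 r
  | _+4, _ => false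

-- Pre_ excludes the inputs where A raises (NameError/ValueError/IndexError on
-- malformed tokens or out-of-range digits) and the malformed inputs on which A's
-- returned value is an accident of its adjacent-pair scan — a bare token run
-- outside any group ("12") or an unclosed group with two or more tokens ("(12"),
-- where A applies the successor pairs of a group that never closed; B ignores
-- such stray characters (see claim.json cites).
def Pre_bijection (data : String) (n : Int) : Prop := wfAux n 0 data.toList = true
instance (data : String) (n : Int) : Decidable (Pre_bijection data n) := by
  unfold Pre_bijection; infer_instance

def pvWitness_bijection : String × Int := ("(021)(34)", 5)

def Spec_bijection (data : String) (n : Int) (out : List Int) : Prop := out = bijection_alt data n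
instance (data : String) (n : Int) (out : List Int) : Decidable (Spec_bijection data n out) := by
  unfold Spec_bijection; infer_instance

-- ===== CLAIM (what is proved, stated in full; the proofs are below) =====
def Claim_equal_bijection : Prop := ∀ (data : String) (n : Int), Dom_bijection data n → Pre_bijection data n → Spec_bijection data n (bijection data n)

-- ===== LEMMAS AND PROOFS =====

-- A's fold over adjacent pairs, as a two-at-a-time recursion (for induction).
def runA : List Char → List Int × Char → List Int × Char
  | a :: b :: t, st => runA (b :: t) (bijAStep st (a, b))
  | _, st => st

theorem runA_eq_fold (l : List Char) (st : List Int × Char) :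
    List.foldl bijAStep st (l.zip l.tail) = runA l st := by
  match l with
  | [] => rfl
  | [a] => rfl
  | a :: b :: t =>
    simp only [List.zip, List.tail, runA]
    rw [show (a :: b :: t).zipWith Prod.mk (b :: t) = (a, b) :: ((b :: t).zipWith Prod.mk t) from rfl]
    rw [List.foldl_cons]
    exact runA_eq_fold (b :: t) _

def isTok (c : Char) : Prop := c ≠ '(' ∧ c ≠ ')'

theorem okTok_isTok {n : Int} {c : Char} (h : okTok n c = true) : isTok c := by
  simp only [okTok, Bool.and_eq_true] at h
  constructor <;> rintro rfl <;> simp [Char.isDigit] at h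

-- The four shapes A's loop body takes on a pair.
theorem stepA_rparen (id : List Int) (k x : Char) :
    bijAStep (id, k) (')', x) = (id, k) := by simp [bijAStep]

theorem stepA_lparen (id : List Int) (k x : Char) (hx : x ≠ ')') :
    bijAStep (id, k) ('(', x) = (id, x) := by simp [bijAStep, hx]

theorem stepA_close (id : List Int) (k d : Char) (hd : isTok d) :
    bijAStep (id, k) (d, ')') = (id.set (pyDigit d).toNat (pyDigit k), k) := by
  simp [bijAStep, hd.1, hd.2]

theorem stepA_tok (id : List Int) (k d t : Char) (hd : isTok d) (ht : t ≠ ')') :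
    bijAStep (id, k) (d, t) = (id.set (pyDigit d).toNat (pyDigit t), k) := by
  simp [bijAStep, hd.1, hd.2, ht]

theorem runA_close (rest : List Char) (st : List Int × Char) :
    runA (')' :: rest) st = runA rest st := by
  match rest with
  | [] => rfl
  | r :: t =>
    show runA (r :: t) (bijAStep st (')', r)) = _
    rw [show bijAStep st (')', r) = st from by cases st; exact stepA_rparen _ _ _]

-- B-side: the parse accumulator only grows on the left.
theorem parse_acc (l : List Char) (acc : List (List Char)) (cur : Option (List Char)) :
    (l.foldl parseStep (acc, cur)).1 = acc ++ (l.foldl parseStep ([], cur)).1 := by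
  induction l generalizing acc cur with
  | nil => simp
  | cons ch t ih =>
    simp only [List.foldl_cons, parseStep]
    by_cases h1 : ch = '('
    · simp only [if_pos h1]; exact ih acc (some [])
    · by_cases h2 : ch = ')'
      · simp only [if_neg h1, if_pos h2]
        cases cur with
        | none => exact ih acc none
        | some c =>
          by_cases hc : c = []
          · simp only [hc]; exact ih acc none
          · simp only [if_pos (show c ≠ [] from hc)]
            rw [ih (acc ++ [c]) none, ih ([] ++ [c]) none]
            simp
      · simp only [if_neg h1, if_neg h2]
        cases cur with
        | some c => exact ih acc (some (c ++ [ch]))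
        | none => exact ih acc none

-- The successor-pair assignments of a cycle (B's inner zip fold).
def pairFold (c : List Char) (id : List Int) : List Int :=
  (c.zip c.tail).foldl (fun id p => id.set (pyDigit p.1).toNat (pyDigit p.2)) id

theorem pairFold_snoc (c : List Char) (h : c ≠ []) (t : Char) (id : List Int) :
    pairFold (c ++ [t]) id
      = (pairFold c id).set (pyDigit (c.getLast h)).toNat (pyDigit t) := by
  match c with
  | [d] => simp [pairFold]
  | d1 :: d2 :: c' =>
    show pairFold ((d1 :: d2 :: c') ++ [t]) id = _
    have e1 : pairFold ((d1 :: d2 :: c') ++ [t]) id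
        = pairFold ((d2 :: c') ++ [t]) (id.set (pyDigit d1).toNat (pyDigit d2)) := rfl
    have e2 : pairFold (d1 :: d2 :: c') id
        = pairFold (d2 :: c') (id.set (pyDigit d1).toNat (pyDigit d2)) := rfl
    rw [e1, e2, pairFold_snoc (d2 :: c') (by simp) t]
    rw [show (d1 :: d2 :: c').getLast h = (d2 :: c').getLast (by simp) from rfl]

theorem pyGet_neg_one_getLast (c : List Char) (h : c ≠ []) :
    PySem.List.pyGet? c (-1) = some (c.getLast h) := by
  rw [PySem.List.pyGet?_neg_one, List.getLast?_eq_getLast_of_ne_nil h]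

theorem bijCycleApply_eq (id : List Int) (c : List Char) (h : c ≠ []) :
    bijCycleApply id c
      = (pairFold c id).set (pyDigit (c.getLast h)).toNat (pyDigit (c.headD ' ')) := by
  match c with
  | d :: b =>
    unfold bijCycleApply
    rw [pyGet_neg_one_getLast (d :: b) (by simp), PySem.List.pyGet?_zero_cons]
    rfl

theorem headD_append_singleton_snoc (b : List Char) (d t : Char) :
    ((b ++ [d]) ++ [t]).headD ' ' = (b ++ [d]).headD ' ' := by
  cases b <;> simp

-- The main mutual-state induction: for every wf suffix, A's remaining pass
-- equals B's remaining parse-then-apply.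
--   state 0: l follows a closed group / start;  state 1: '(' just seen (the '('
--   is kept on A's side so the adjacent pairs align);  states 2/3: inside a
--   group, b ++ [d] the tokens so far (A has already performed their successor
--   assignments: pairFold; its keep is the group's first token).
theorem big (N : Nat) : ∀ (l : List Char), l.length ≤ N → ∀ (n : Int),
    ((wfAux n 0 l = true) → ∀ (id : List Int) (k : Char),
      (runA l (id, k)).1 = ((l.foldl parseStep ([], none)).1).foldl bijCycleApply id)
    ∧ ((wfAux n 1 l = true) → ∀ (id : List Int) (k : Char),
      (runA ('(' :: l) (id, k)).1 = ((l.foldl parseStep ([], some [])).1).foldl bijCycleApply id)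
    ∧ (∀ (b : List Char) (d : Char), (∀ c ∈ b, isTok c) → isTok d →
      (wfAux n (if b = [] then 2 else 3) l = true) → ∀ (id0 : List Int),
      (runA (d :: l) (pairFold (b ++ [d]) id0, (b ++ [d]).headD ' ')).1
        = ((l.foldl parseStep ([], some (b ++ [d]))).1).foldl bijCycleApply id0) := by
  induction N with
  | zero =>
    intro l hlen n
    have : l = [] := List.eq_nil_of_length_eq_zero (Nat.le_zero.mp hlen)
    subst this
    refine ⟨fun _ id k => rfl, fun _ id k => rfl, ?_⟩
    intro b d hb hd hwf id0
    cases b with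
    | nil => simp [runA, pairFold]
    | cons x xs => simp [wfAux] at hwf
  | succ N ih =>
    intro l hlen n
    match l with
    | [] =>
      refine ⟨fun _ id k => rfl, fun _ id k => rfl, ?_⟩
      intro b d hb hd hwf id0
      cases b with
      | nil => simp [runA, pairFold]
      | cons x xs => simp [wfAux] at hwf
    | c :: r =>
      have hr : r.length ≤ N := by simpa using Nat.lt_succ_iff.mp (Nat.lt_of_lt_of_le (by simp) hlen)
      obtain ⟨ih0, ih1, ihIn⟩ := ih r hr n
      refine ⟨?_, ?_, ?_⟩
      -- state 0
      · intro hwf id k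
        by_cases h1 : c = '('
        · subst h1
          rw [wfAux, if_pos rfl] at hwf
          simpa [parseStep] using ih1 hwf id k
        · by_cases h2 : c = ')'
          · subst h2
            rw [wfAux, if_neg (by decide), if_pos rfl] at hwf
            rw [runA_close]
            simpa [parseStep] using ih0 hwf id k
          · rw [wfAux, if_neg h1, if_neg h2] at hwf
            have : r = [] := by simpa using hwf
            subst this
            simp [runA, parseStep, h1, h2]
      -- state 1
      · intro hwf id k
        by_cases h1 : c = '('
        · subst h1
          rw [wfAux, if_pos rfl] at hwf
          show (runA ('(' :: '(' :: r) (id, k)).1 = _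
          rw [show runA ('(' :: '(' :: r) (id, k) = runA ('(' :: r) (id, '(') from by
            show runA ('(' :: r) (bijAStep (id, k) ('(', '(')) = _
            rw [stepA_lparen id k '(' (by decide)]]
          simpa [parseStep] using ih1 hwf id '('
        · by_cases h2 : c = ')'
          · subst h2; rw [wfAux, if_neg (by decide), if_pos rfl] at hwf; exact absurd hwf (by simp)
          · rw [wfAux, if_neg h1, if_neg h2] at hwf
            by_cases h3 : okTok n c = true
            · rw [if_pos h3] at hwf
              have hc : isTok c := okTok_isTok h3
              show (runA ('(' :: c :: r) (id, k)).1 = _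
              rw [show runA ('(' :: c :: r) (id, k) = runA (c :: r) (id, c) from by
                show runA (c :: r) (bijAStep (id, k) ('(', c)) = _
                rw [stepA_lparen id k c hc.2]]
              have := ihIn [] c (by simp) hc (by simpa using hwf) id
              simpa [parseStep, pairFold, hc.1, hc.2] using this
            · rw [if_neg h3] at hwf
              have : r = [] := by simpa using hwf
              subst this
              have : runA ['(', c] (id, k) = (id, c) := by
                show runA [c] (bijAStep (id, k) ('(', c)) = _
                rw [stepA_lparen id k c h2]; rfl
              simp [this, parseStep, h1, h2]
      -- states 2/3
      · intro b d hb hd hwf id0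
        have hbd : b ++ [d] ≠ [] := by simp
        by_cases h2 : c = ')'
        · subst h2
          have hwf0 : wfAux n 0 r = true := by
            cases b with
            | nil => simpa [wfAux] using hwf
            | cons x xs => simpa [wfAux] using hwf
          show (runA (d :: ')' :: r) _).1 = _
          rw [show runA (d :: ')' :: r) (pairFold (b ++ [d]) id0, (b ++ [d]).headD ' ')
              = runA r (bijCycleApply id0 (b ++ [d]), (b ++ [d]).headD ' ') from by
            show runA (')' :: r) (bijAStep _ (d, ')')) = _
            rw [stepA_close _ _ d hd, runA_close]
            rw [bijCycleApply_eq id0 (b ++ [d]) hbd]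
            rw [show (b ++ [d]).getLast hbd = d from List.getLast_append _]]
          rw [ih0 hwf0 (bijCycleApply id0 (b ++ [d])) ((b ++ [d]).headD ' ')]
          have hp : (')' :: r).foldl parseStep ([], some (b ++ [d]))
              = r.foldl parseStep ([b ++ [d]], none) := by
            rw [List.foldl_cons]
            congr 1
            simp [parseStep]
          rw [hp, parse_acc r [b ++ [d]] none]
          simp
        · have hstep : wfAux n (if b = [] then 2 else 3) (c :: r)
              = (okTok n c && wfAux n 3 r) := by
            cases b with
            | nil => simp [wfAux, h2]
            | cons x xs => simp [wfAux, h2]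
          rw [hstep, Bool.and_eq_true] at hwf
          obtain ⟨hok, hwf3⟩ := hwf
          have hc : isTok c := okTok_isTok hok
          show (runA (d :: c :: r) _).1 = _
          rw [show runA (d :: c :: r) (pairFold (b ++ [d]) id0, (b ++ [d]).headD ' ')
              = runA (c :: r) (pairFold ((b ++ [d]) ++ [c]) id0, ((b ++ [d]) ++ [c]).headD ' ') from by
            show runA (c :: r) (bijAStep _ (d, c)) = _
            rw [stepA_tok _ _ d c hd hc.2]
            rw [pairFold_snoc (b ++ [d]) hbd c id0]
            rw [show (b ++ [d]).getLast hbd = d from List.getLast_append _]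
            rw [headD_append_singleton_snoc]]
          have := ihIn (b ++ [d]) c
            (by intro x hx; rcases List.mem_append.mp hx with hx | hx
                · exact hb x hx
                · simp at hx; subst hx; exact hd)
            hc (by simp [hwf3]) id0
          rw [this]
          simp [parseStep, hc.1, hc.2]

-- ===== VERDICT (by name: the statement is the Claim_ definition above) =====
theorem bijection_spec : Claim_equal_bijection := by
  intro data n _ hpre
  unfold Spec_bijection bijection bijection_alt
  show (List.foldl bijAStep (PySem.List.pyRange 0 n 1, ' ')
      (data.toList.zip data.toList.tail)).1
    = List.foldl bijCycleApply (PySem.List.pyRange 0 n 1)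
        (List.foldl parseStep ([], none) data.toList).1
  rw [runA_eq_fold]
  exact (big data.toList.length data.toList le_rfl n).1 hpre _ ' '
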